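-- pv_equiv track=rewrite | github.com/lucafusarbassini/research-automation | core/social_media.py | generate_thread
-- ===== SOURCE A (Python) =====
-- def generate_thread(content: str, max_chars: int = 280) -> list[str]:
--     """Break content into a Twitter/X-style thread.
--
--     Splits on word boundaries so no tweet exceeds *max_chars*.
--     """
--     if len(content) <= max_chars:
--         return [content]
--
--     words = content.split()
--     tweets: list[str] = []
--     current = ""
--     for word in words:
--         candidate = f"{current} {word}".strip() if current else word
--         if len(candidate) > max_chars:
--             if current:
--                 tweets.append(current)
--             # If a single word exceeds max_chars, hard-wrap it.
--             while len(word) > max_chars: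
--                 tweets.append(word[:max_chars])
--                 word = word[max_chars:]
--             current = word
--         else:
--             current = candidate
--     if current:
--         tweets.append(current)
--     return tweets
-- ===== SOURCE B (Python) =====
-- def generate_thread(content: str, max_chars: int = 280) -> list[str]:
--     """Break content into a thread: slice hard-wrapped tokens, then pack maximal groups."""
--     if len(content) <= max_chars:
--         return [content]
--     # Pass 1: flat token list, every word hard-wrapped into max_chars-sized slices.
--     tokens: list[str] = []
--     for w in content.split():
--         for i in range(0, len(w), max_chars):
--             tokens.append(w[i:i + max_chars])
--     # Pass 2: each tweet is the maximal group of leading tokens that fits when space-joined.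
--     tweets: list[str] = []
--     while tokens:
--         head, rest = tokens[0], tokens[1:]
--         chunk, width = [head], len(head)
--         while rest and width + 1 + len(rest[0]) <= max_chars:
--             width += 1 + len(rest[0])
--             chunk.append(rest[0])
--             rest = rest[1:]
--         tweets.append(" ".join(chunk))
--         tokens = rest
--     return tweets
-- ===== Notes on version B (the rewrite author's own statement) =====
-- stated objective: alternative
-- what changed: A's single fused loop that mutates (tweets, current) and hard-wraps over-long words inline is replaced by two staged passes with different primitives: a slicing pass that cuts every word into max_chars-sized tokens via range-indexed slices, then a packer that repeatedly extracts the maximal leading group of tokens whose space-joined width fits and emits ' '.join(group) - no running candidate string is ever concatenated.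
import Mathlib
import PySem

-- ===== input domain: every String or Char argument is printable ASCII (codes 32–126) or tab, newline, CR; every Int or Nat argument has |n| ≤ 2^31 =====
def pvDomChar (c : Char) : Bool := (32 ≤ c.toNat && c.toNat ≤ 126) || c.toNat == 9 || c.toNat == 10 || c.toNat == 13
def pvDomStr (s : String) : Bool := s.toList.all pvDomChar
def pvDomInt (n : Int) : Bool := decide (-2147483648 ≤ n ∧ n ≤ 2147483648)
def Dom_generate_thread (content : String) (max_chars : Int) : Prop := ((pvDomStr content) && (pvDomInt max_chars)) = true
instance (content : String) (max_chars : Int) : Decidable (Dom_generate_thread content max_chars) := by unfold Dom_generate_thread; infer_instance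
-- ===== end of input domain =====

-- B replaces A's single mutating loop (greedy join with an inline hard-wrap of the running word)
-- by two staged passes: range-indexed slicing of every word into max_chars-sized tokens, then a
-- packer that extracts the maximal leading token group that fits and space-joins it.
-- Objective: alternative decomposition, same asymptotic cost.

-- ===== PORT A =====

-- A's inner 'while len(word) > max_chars' hard-wrap loop, carrying A's 'tweets' accumulator.
-- The '1 ≤ max_chars' conjunct is a totality guard only: the Python loop diverges when
-- max_chars ≤ 0 (those inputs are excluded by Pre_generate_thread).
def wrapGT (max_chars : Int) (word : List Char) (tweets : List (List Char)) :
    List (List Char) × List Char :=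
  if 1 ≤ max_chars ∧ max_chars < (word.length : Int) then
    wrapGT max_chars (PySem.List.slice word (some max_chars) none)
      (tweets ++ [PySem.List.slice word none (some max_chars)])
  else (tweets, word)
termination_by word.length
decreasing_by
  simp only [PySem.List.slice_from word (by omega : (0:Int) ≤ max_chars), List.length_drop]
  omega

-- A's 'for word in words' loop; state = (tweets, current).
def loopGT (max_chars : Int) : List (List Char) → List (List Char) → List Char → List (List Char)
  | [], tweets, current => if current.isEmpty then tweets else tweets ++ [current]
  | word :: ws, tweets, current =>
      let candidate := if current.isEmpty then word
                       else PySem.Chars.strip (current ++ ' ' :: word)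
      if max_chars < (candidate.length : Int) then
        let tweets1 := if current.isEmpty then tweets else tweets ++ [current]
        let p := wrapGT max_chars word tweets1
        loopGT max_chars ws p.1 p.2
      else loopGT max_chars ws tweets candidate

def generate_thread (content : String) (max_chars : Int) : List String :=
  if (content.toList.length : Int) ≤ max_chars then [content]
  else (loopGT max_chars (PySem.Chars.split₀ content.toList) [] []).map String.ofList

-- ===== PORT B =====

-- B pass 1: 'for i in range(0, len(w), max_chars): tokens.append(w[i:i+max_chars])',
-- folded over the words of content.split().
def tokensB (m : Int) (ws : List (List Char)) : List (List Char) :=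
  ws.foldl (fun acc w =>
    (PySem.List.pyRange 0 (w.length : Int) m).foldl
      (fun acc2 i => acc2 ++ [PySem.List.slice w (some i) (some (i + m))]) acc) []

-- B's inner 'while rest and width + 1 + len(rest[0]) <= max_chars' loop:
-- returns (tokens moved into the chunk, remaining rest).
def grabB (m : Int) (width : Int) : List (List Char) → List (List Char) × List (List Char)
  | [] => ([], [])
  | t :: ts =>
      if width + 1 + (t.length : Int) ≤ m then
        let p := grabB m (width + 1 + (t.length : Int)) ts
        (t :: p.1, p.2)
      else ([], t :: ts)

-- the rest left by grabB is a suffix of its input (needed for packB's termination)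
theorem grabB_rest_le (m : Int) : ∀ (ts : List (List Char)) (width : Int),
    (grabB m width ts).2.length ≤ ts.length := by
  intro ts
  induction ts with
  | nil => intro width; simp [grabB]
  | cons t ts ih =>
    intro width
    by_cases h : width + 1 + (t.length : Int) ≤ m
    · simp only [grabB, if_pos h]
      exact le_trans (ih _) (Nat.le_succ _)
    · simp [grabB, if_neg h]

-- B's outer 'while tokens' loop: emit ' '.join(head :: chunk), continue on the rest.
def packB (m : Int) : List (List Char) → List (List Char)
  | [] => []
  | head :: rest =>
      let p := grabB m (head.length : Int) rest
      PySem.Chars.join [' '] (head :: p.1) :: packB m p.2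
termination_by ts => ts.length
decreasing_by
  exact Nat.lt_succ_of_le (grabB_rest_le m rest _)

def generate_thread_alt (content : String) (max_chars : Int) : List String :=
  if (content.toList.length : Int) ≤ max_chars then [content]
  else (packB max_chars (tokensB max_chars (PySem.Chars.split₀ content.toList))).map String.ofList

-- ===== PRECONDITION & SPEC =====
-- Pre_ excludes exactly the inputs on which Python A never returns: for max_chars ≤ 0, a content
-- longer than max_chars with at least one non-whitespace character makes A's hard-wrap while
-- loop run forever. On every input admitted here A returns normally.
def Pre_generate_thread (content : String) (max_chars : Int) : Prop :=
  1 ≤ max_chars ∨ (content.toList.length : Int) ≤ max_chars ∨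
    content.toList.all PySem.Chars.isspace = true
instance (content : String) (max_chars : Int) : Decidable (Pre_generate_thread content max_chars) := by
  unfold Pre_generate_thread; infer_instance

def pvWitness_generate_thread : String × Int := ("hello world, this is a longer test", 10)

def Spec_generate_thread (content : String) (max_chars : Int) (out : List String) : Prop := out = generate_thread_alt content max_chars
instance (content : String) (max_chars : Int) (out : List String) : Decidable (Spec_generate_thread content max_chars out) := by unfold Spec_generate_thread; infer_instance

-- ===== CLAIM (what is proved, stated in full; the proofs are below) =====
def Claim_equal_generate_thread : Prop := ∀ (content : String) (max_chars : Int), Dom_generate_thread content max_chars → Pre_generate_thread content max_chars → Spec_generate_thread content max_chars (generate_thread content max_chars)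

-- ===== LEMMAS AND PROOFS =====

-- Proof-only bridge: the token stream of one word, as a recursion on the word
-- (B's slicing pass and A's hard-wrap loop are both related to this).
def tokWordGT (max_chars : Int) (word : List Char) : List (List Char) :=
  if 1 ≤ max_chars ∧ max_chars < (word.length : Int) then
    PySem.List.slice word none (some max_chars)
      :: tokWordGT max_chars (PySem.List.slice word (some max_chars) none)
  else if word.isEmpty then [] else [word]
termination_by word.length
decreasing_by
  simp only [PySem.List.slice_from word (by omega : (0:Int) ≤ max_chars), List.length_drop]
  omega

-- Proof-only bridge: greedy packing with a running joined string (the shape A's loop reduces to).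
def packGT (max_chars : Int) : List (List Char) → List (List Char) → List Char → List (List Char)
  | [], tweets, current => if current.isEmpty then tweets else tweets ++ [current]
  | tok :: ts, tweets, current =>
      let candidate := if current.isEmpty then tok else current ++ ' ' :: tok
      if (candidate.length : Int) ≤ max_chars then packGT max_chars ts tweets candidate
      else packGT max_chars ts (tweets ++ [current]) tok

-- A's hard-wrap loop only appends to its accumulator.
theorem wrapGT_append (m : Int) : ∀ (n : Nat) (w : List Char), w.length = n →
    ∀ tw, wrapGT m w tw = (tw ++ (wrapGT m w []).1, (wrapGT m w []).2) := by
  intro n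
  induction n using Nat.strong_induction_on with
  | _ n ih =>
    intro w hw tw
    conv_lhs => rw [wrapGT]
    conv_rhs => rw [wrapGT]
    by_cases h : 1 ≤ m ∧ m < (w.length : Int)
    · simp only [if_pos h]
      have hdrop : (PySem.List.slice w (some m) none).length < n := by
        rw [PySem.List.slice_from w (by omega : (0:Int) ≤ m)]
        simp only [List.length_drop]; omega
      rw [ih _ hdrop _ rfl (tw ++ [PySem.List.slice w none (some m)]),
          ih _ hdrop _ rfl ([] ++ [PySem.List.slice w none (some m)])]
      simp
    · simp only [if_neg h]
      simp

-- One-step unfoldings of the hard-wrap loop and the token bridge.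
theorem wrapGT_pos (m : Int) (w : List Char) (hm : 1 ≤ m) (hw : m < (w.length : Int)) :
    wrapGT m w [] = (w.take m.toNat :: (wrapGT m (w.drop m.toNat) []).1,
                     (wrapGT m (w.drop m.toNat) []).2) := by
  rw [wrapGT, if_pos ⟨hm, hw⟩,
      PySem.List.slice_from w (by omega : (0:Int) ≤ m),
      PySem.List.slice_to w (by omega : (0:Int) ≤ m),
      wrapGT_append m (w.drop m.toNat).length _ rfl]
  simp

theorem wrapGT_neg (m : Int) (w : List Char) (h : ¬(1 ≤ m ∧ m < (w.length : Int))) :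
    wrapGT m w [] = ([], w) := by
  rw [wrapGT, if_neg h]

theorem tokWordGT_pos (m : Int) (w : List Char) (hm : 1 ≤ m) (hw : m < (w.length : Int)) :
    tokWordGT m w = w.take m.toNat :: tokWordGT m (w.drop m.toNat) := by
  rw [tokWordGT, if_pos ⟨hm, hw⟩,
      PySem.List.slice_from w (by omega : (0:Int) ≤ m),
      PySem.List.slice_to w (by omega : (0:Int) ≤ m)]

theorem tokWordGT_neg (m : Int) (w : List Char) (h : ¬(1 ≤ m ∧ m < (w.length : Int))) :
    tokWordGT m w = if w.isEmpty then [] else [w] := by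
  rw [tokWordGT, if_neg h]

-- Every token produced by the bridge fits in max_chars and is non-empty.
theorem tokWordGT_len (m : Int) (hm : 1 ≤ m) : ∀ (n : Nat) (w : List Char), w.length = n →
    ∀ t ∈ tokWordGT m w, (t.length : Int) ≤ m ∧ t ≠ [] := by
  intro n
  induction n using Nat.strong_induction_on with
  | _ n ih =>
    intro w hw t ht
    by_cases h : m < (w.length : Int)
    · rw [tokWordGT_pos m w hm h] at ht
      rcases List.mem_cons.mp ht with h1 | h1
      · subst h1
        constructor
        · simp only [List.length_take]; omega
        · intro hnil
          have := congrArg List.length hnil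
          simp only [List.length_take, List.length_nil] at this
          omega
      · have hdrop : (w.drop m.toNat).length < n := by
          simp only [List.length_drop]; omega
        exact ih _ hdrop _ rfl t h1
    · rw [tokWordGT_neg m w (by omega)] at ht
      by_cases hw0 : w.isEmpty
      · rw [if_pos hw0] at ht; simp at ht
      · rw [if_neg hw0] at ht
        have : t = w := by simpa using ht
        subst this
        exact ⟨by omega, by simpa [List.isEmpty_iff] using hw0⟩

-- The remainder left by the hard-wrap loop is a suffix of the word.
theorem wrapGT_rest_suffix (m : Int) : ∀ (n : Nat) (w : List Char), w.length = n →
    (wrapGT m w []).2 <:+ w := by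
  intro n
  induction n using Nat.strong_induction_on with
  | _ n ih =>
    intro w hw
    by_cases h : 1 ≤ m ∧ m < (w.length : Int)
    · rw [wrapGT_pos m w h.1 h.2]
      have hdrop : (w.drop m.toNat).length < n := by
        simp only [List.length_drop]; omega
      exact (ih _ hdrop _ rfl).trans (List.drop_suffix _ _)
    · rw [wrapGT_neg m w h]

-- When the loop runs at all, the remainder fits in max_chars.
theorem wrapGT_rest_le (m : Int) (hm : 1 ≤ m) : ∀ (n : Nat) (w : List Char), w.length = n →
    m < (w.length : Int) → ((wrapGT m w []).2.length : Int) ≤ m := by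
  intro n
  induction n using Nat.strong_induction_on with
  | _ n ih =>
    intro w hw hlen
    rw [wrapGT_pos m w hm hlen]
    have hdrop : (w.drop m.toNat).length < n := by
      simp only [List.length_drop]; omega
    by_cases h : m < ((w.drop m.toNat).length : Int)
    · exact ih _ hdrop _ rfl h
    · rw [wrapGT_neg m (w.drop m.toNat) (by omega)]
      simpa using (by omega : ((w.drop m.toNat).length : Int) ≤ m)

-- '.strip()' is the identity when the first and last characters are not whitespace.
theorem strip_noop (cs : List Char) (hne : cs ≠ [])
    (h1 : ∀ a, cs.head? = some a → PySem.Chars.isspace a = false)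
    (h2 : ∀ a, cs.getLast? = some a → PySem.Chars.isspace a = false) :
    PySem.Chars.strip cs = cs := by
  unfold PySem.Chars.strip PySem.Chars.rstrip PySem.Chars.lstrip
  have hl : cs.dropWhile PySem.Chars.isspace = cs := by
    cases cs with
    | nil => rfl
    | cons a t => rw [List.dropWhile_cons, if_neg (by simp [h1 a rfl])]
  rw [hl]
  cases hr : cs.reverse with
  | nil => exact absurd (by simpa using congrArg List.reverse hr) hne
  | cons b t =>
    have hb : cs.getLast? = some b := by rw [← List.head?_reverse, hr]; rfl
    rw [List.dropWhile_cons, if_neg (by simp [h2 b hb]), ← hr, List.reverse_reverse]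

-- A held chunk of length exactly max_chars may be flushed eagerly: packing the remaining
-- tokens (all fitting) from (tweets, chunk) equals packing them from (tweets ++ [chunk], "").
theorem packGT_shift (m : Int) (hm : 1 ≤ m) (c : List Char) (hc : (c.length : Int) = m) :
    ∀ (ts : List (List Char)) (tw : List (List Char)), (∀ t ∈ ts, (t.length : Int) ≤ m) →
    packGT m ts tw c = packGT m ts (tw ++ [c]) [] := by
  have hcne : c.isEmpty = false := by
    cases c with
    | nil => simp at hc; omega
    | cons a t => rfl
  intro ts tw hts
  cases ts with
  | nil => simp [packGT, hcne]
  | cons t ts =>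
    have ht : (t.length : Int) ≤ m := hts t (by simp)
    have hbig : ¬(((c ++ ' ' :: t).length : Int) ≤ m) := by
      simp only [List.length_append, List.length_cons]
      push_cast
      omega
    simp only [packGT, hcne, Bool.false_eq_true, if_false, List.isEmpty_nil, if_true,
      if_neg hbig, if_pos ht]

-- A non-empty held chunk is flushed by any token that does not fit next to it.
theorem packGT_flush (m : Int) (t : List Char) (ts tw : List (List Char)) (cur : List Char)
    (hcur : cur.isEmpty = false) (hbig : m < (cur.length : Int) + 1 + (t.length : Int)) :
    packGT m (t :: ts) tw cur = packGT m ts (tw ++ [cur]) t := by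
  have hbig' : ¬(((cur ++ ' ' :: t).length : Int) ≤ m) := by
    simp only [List.length_append, List.length_cons]
    push_cast
    omega
  simp only [packGT, hcur, Bool.false_eq_true, if_false, if_neg hbig']

-- Packing the tokens of one word starting from an empty running tweet lands in exactly
-- the state A's hard-wrap loop produces: tweets gains the full chunks, current = remainder.
theorem packGT_inner (m : Int) (hm : 1 ≤ m) : ∀ (n : Nat) (w : List Char), w.length = n →
    ∀ (rest tw : List (List Char)), (∀ t ∈ rest, (t.length : Int) ≤ m) →
    packGT m (tokWordGT m w ++ rest) tw []
      = packGT m rest (tw ++ (wrapGT m w []).1) (wrapGT m w []).2 := by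
  intro n
  induction n using Nat.strong_induction_on with
  | _ n ih =>
    intro w hw rest tw hrest
    by_cases h : m < (w.length : Int)
    · have htake : ((w.take m.toNat).length : Int) = m := by
        simp only [List.length_take]
        omega
      have hdrop : (w.drop m.toNat).length < n := by
        simp only [List.length_drop]; omega
      rw [tokWordGT_pos m w hm h, wrapGT_pos m w hm h, List.cons_append]
      have hfit : ((w.take m.toNat).length : Int) ≤ m := le_of_eq htake
      simp only [packGT, List.isEmpty_nil, if_true, if_pos hfit]
      rw [packGT_shift m hm _ htake _ tw (by
        intro t ht
        rcases List.mem_append.mp ht with h1 | h1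
        · exact (tokWordGT_len m hm (w.drop m.toNat).length _ rfl t h1).1
        · exact hrest t h1)]
      rw [ih _ hdrop _ rfl rest _ hrest]
      simp
    · rw [tokWordGT_neg m w (by omega), wrapGT_neg m w (by omega)]
      by_cases hw0 : w.isEmpty
      · have : w = [] := List.isEmpty_iff.mp hw0
        subst this
        simp
      · rw [if_neg hw0]
        have hfit : ((w.length : Int)) ≤ m := by omega
        simp only [List.cons_append, packGT, List.isEmpty_nil, if_true, if_pos hfit]
        simp

-- Main loop correspondence: A's fused loop equals greedy packing of the flat token list.
theorem loopGT_eq_packGT (m : Int) (hm : 1 ≤ m) :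
    ∀ (ws : List (List Char)), (∀ w ∈ ws, w ≠ [] ∧ ∀ c ∈ w, PySem.Chars.isspace c = false) →
    ∀ (tw : List (List Char)) (cur : List Char),
    (∀ a, cur.head? = some a → PySem.Chars.isspace a = false) → (cur.length : Int) ≤ m →
    loopGT m ws tw cur = packGT m (ws.flatMap (fun w => tokWordGT m w)) tw cur := by
  intro ws
  induction ws with
  | nil =>
    intro _ tw cur _ _
    rfl
  | cons w ws ih =>
    intro hws tw cur hcur hcurlen
    obtain ⟨hwne, hwns⟩ := hws w (by simp)
    have hws' : ∀ w ∈ ws, w ≠ [] ∧ ∀ c ∈ w, PySem.Chars.isspace c = false := by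
      intro w' hw'; exact hws w' (by simp [hw'])
    have hrest_le : ∀ t ∈ ws.flatMap (fun w => tokWordGT m w), (t.length : Int) ≤ m := by
      intro t ht
      rcases List.mem_flatMap.mp ht with ⟨w', _, ht'⟩
      exact (tokWordGT_len m hm w'.length _ rfl t ht').1
    have hrhead : ∀ a, (wrapGT m w []).2.head? = some a → PySem.Chars.isspace a = false := by
      intro a ha
      exact hwns a ((wrapGT_rest_suffix m w.length w rfl).subset (List.mem_of_mem_head? ha))
    have hrlen : ((wrapGT m w []).2.length : Int) ≤ m := by
      by_cases hwb : m < (w.length : Int)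
      · exact wrapGT_rest_le m hm w.length w rfl hwb
      · rw [wrapGT_neg m w (by omega)]
        dsimp only
        omega
    rw [List.flatMap_cons]
    by_cases hce : cur.isEmpty
    · have hcur0 : cur = [] := List.isEmpty_iff.mp hce
      subst hcur0
      by_cases hbig : m < (w.length : Int)
      · simp only [loopGT, List.isEmpty_nil, if_true, if_pos hbig]
        rw [wrapGT_append m w.length w rfl tw]
        dsimp only
        rw [ih hws' _ _ hrhead hrlen,
            packGT_inner m hm w.length w rfl _ tw hrest_le]
      · have hfit : (w.length : Int) ≤ m := by omega
        simp only [loopGT, List.isEmpty_nil, if_true,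
          if_neg (by omega : ¬ m < (w.length : Int))]
        rw [tokWordGT_neg m w (by omega), if_neg (by simp [hwne]), List.cons_append]
        simp only [packGT, List.isEmpty_nil, if_true, if_pos hfit]
        exact ih hws' tw w (fun a ha => hwns a (List.mem_of_mem_head? ha)) hfit
    · have hcne : cur ≠ [] := by simpa [List.isEmpty_iff] using hce
      have hce' : cur.isEmpty = false := by simpa using hce
      have hcurhead : ∀ a, (cur ++ ' ' :: w).head? = some a → PySem.Chars.isspace a = false := by
        intro a ha
        rw [List.head?_append] at ha
        cases hh : cur.head? with
        | none => exact absurd hh (by simp [hcne])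
        | some b =>
          rw [hh, Option.some_or] at ha
          exact (Option.some.inj ha) ▸ hcur b hh
      have hcand : PySem.Chars.strip (cur ++ ' ' :: w) = cur ++ ' ' :: w := by
        apply strip_noop _ (by simp [hcne]) hcurhead
        intro a ha
        rw [List.getLast?_append] at ha
        have hwl : (' ' :: w).getLast? = w.getLast? := by
          cases w with
          | nil => exact absurd rfl hwne
          | cons c t => simp [List.getLast?_cons_cons]
        rw [hwl] at ha
        cases hl : w.getLast? with
        | none => exact absurd hl (by simp [hwne])
        | some b =>
          rw [hl, Option.some_or] at ha
          exact (Option.some.inj ha) ▸ hwns b (List.mem_of_getLast? hl)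
      have hclen : ((cur ++ ' ' :: w).length : Int)
          = (cur.length : Int) + 1 + (w.length : Int) := by
        simp only [List.length_append, List.length_cons]
        push_cast
        omega
      by_cases hbig : m < ((cur ++ ' ' :: w).length : Int)
      · simp only [loopGT, hce', Bool.false_eq_true, if_false, hcand, if_pos hbig]
        rw [wrapGT_append m w.length w rfl (tw ++ [cur])]
        dsimp only
        rw [ih hws' _ _ hrhead hrlen]
        by_cases hwb : m < (w.length : Int)
        · have htake : ((w.take m.toNat).length : Int) = m := by
            simp only [List.length_take]
            omega
          have hts : ∀ t ∈ tokWordGT m (w.drop m.toNat)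
              ++ ws.flatMap (fun w => tokWordGT m w), (t.length : Int) ≤ m := by
            intro t ht
            rcases List.mem_append.mp ht with h1 | h1
            · exact (tokWordGT_len m hm (w.drop m.toNat).length _ rfl t h1).1
            · exact hrest_le t h1
          rw [tokWordGT_pos m w hm hwb, List.cons_append,
              packGT_flush m _ _ tw cur hce' (by rw [htake] at *; omega),
              packGT_shift m hm _ htake _ _ hts,
              packGT_inner m hm (w.drop m.toNat).length _ rfl _ _ hrest_le,
              wrapGT_pos m w hm hwb]
          dsimp only
          simp [List.append_assoc]
        · rw [tokWordGT_neg m w (by omega), if_neg (by simp [hwne]), List.cons_append,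
              packGT_flush m w _ tw cur hce' (by rw [hclen] at hbig; omega),
              wrapGT_neg m w (by omega)]
          dsimp only
          simp only [List.append_nil, List.nil_append]
      · have hfit : ((cur ++ ' ' :: w).length : Int) ≤ m := by omega
        have hwfit : ¬(1 ≤ m ∧ m < (w.length : Int)) := by
          rw [hclen] at hfit
          intro hx
          omega
        simp only [loopGT, hce', Bool.false_eq_true, if_false, hcand,
          if_neg (by omega : ¬ m < ((cur ++ ' ' :: w).length : Int))]
        rw [tokWordGT_neg m w hwfit, if_neg (by simp [hwne]), List.cons_append]
        simp only [packGT, hce', Bool.false_eq_true, if_false, if_pos hfit]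
        exact ih hws' tw (cur ++ ' ' :: w) hcurhead hfit

-- split() produces non-empty, whitespace-free words.
theorem split₀_go_props : ∀ (s cur : List Char) (acc : List (List Char)),
    (∀ w ∈ acc, w ≠ [] ∧ ∀ c ∈ w, PySem.Chars.isspace c = false) →
    (∀ c ∈ cur, PySem.Chars.isspace c = false) →
    ∀ w ∈ PySem.Chars.split₀.go s cur acc, w ≠ [] ∧ ∀ c ∈ w, PySem.Chars.isspace c = false := by
  intro s
  induction s with
  | nil =>
    intro cur acc hacc hcur w hw
    by_cases hc : cur.isEmpty
    · simp only [PySem.Chars.split₀.go, hc, if_true, List.mem_reverse] at hw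
      exact hacc w hw
    · simp only [PySem.Chars.split₀.go, hc, Bool.false_eq_true, if_false, List.mem_reverse,
        List.mem_cons] at hw
      rcases hw with h1 | h1
      · subst h1
        constructor
        · simpa [List.isEmpty_iff] using hc
        · intro c hcm
          exact hcur c (List.mem_reverse.mp hcm)
      · exact hacc w h1
  | cons c rest ih =>
    intro cur acc hacc hcur w hw
    by_cases hsp : PySem.Chars.isspace c
    · by_cases hc : cur.isEmpty
      · simp only [PySem.Chars.split₀.go, hsp, if_true, hc] at hw
        exact ih [] acc hacc (by simp) w hw
      · simp only [PySem.Chars.split₀.go, hsp, if_true, hc, Bool.false_eq_true, if_false] at hw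
        refine ih [] (cur.reverse :: acc) ?_ (by simp) w hw
        intro w' hw'
        rcases List.mem_cons.mp hw' with h1 | h1
        · subst h1
          constructor
          · simpa [List.isEmpty_iff] using hc
          · intro c' hcm
            exact hcur c' (List.mem_reverse.mp hcm)
        · exact hacc w' h1
    · simp only [PySem.Chars.split₀.go, hsp, Bool.false_eq_true, if_false] at hw
      refine ih (c :: cur) acc hacc ?_ w hw
      intro c' hc'
      rcases List.mem_cons.mp hc' with h1 | h1
      · subst h1; simpa using hsp
      · exact hcur c' h1

theorem split₀_props (cs : List Char) :
    ∀ w ∈ PySem.Chars.split₀ cs, w ≠ [] ∧ ∀ c ∈ w, PySem.Chars.isspace c = false := by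
  exact split₀_go_props cs [] [] (by simp) (by simp)

-- All-whitespace content splits into no words.
theorem split₀_go_isspace : ∀ (s : List Char) (acc : List (List Char)),
    (∀ c ∈ s, PySem.Chars.isspace c = true) →
    PySem.Chars.split₀.go s [] acc = acc.reverse := by
  intro s
  induction s with
  | nil => intro acc _; simp [PySem.Chars.split₀.go]
  | cons c rest ih =>
    intro acc hs
    have hc : PySem.Chars.isspace c = true := hs c (by simp)
    simp only [PySem.Chars.split₀.go, hc, if_true, List.isEmpty_nil]
    exact ih acc (fun c' hc' => hs c' (by simp [hc']))

theorem split₀_isspace (cs : List Char) (h : ∀ c ∈ cs, PySem.Chars.isspace c = true) :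
    PySem.Chars.split₀ cs = [] := by
  unfold PySem.Chars.split₀
  rw [split₀_go_isspace cs [] h]
  rfl

-- ---- B side: the slicing pass produces exactly the bridge tokens ----

-- range(a, b, s) with positive step: nil and cons unfoldings.
theorem pyRange_pos_nil (a b s : Int) (hs : 0 < s) (h : b ≤ a) :
    PySem.List.pyRange a b s = [] := by
  rw [PySem.List.pyRange_of_pos a b hs, if_neg (by omega)]
  rfl

theorem pyRange_pos_cons (a b s : Int) (hs : 0 < s) (h : a < b) :
    PySem.List.pyRange a b s = a :: PySem.List.pyRange (a + s) b s := by
  rw [PySem.List.pyRange_of_pos a b hs, PySem.List.pyRange_of_pos (a + s) b hs, if_pos h]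
  have key : ((b - a + s - 1) / s).toNat
      = (if a + s < b then ((b - (a + s) + s - 1) / s).toNat else 0) + 1 := by
    by_cases h2 : a + s < b
    · rw [if_pos h2]
      have : b - a + s - 1 = (b - (a + s) + s - 1) + 1 * s := by ring
      rw [this, Int.add_mul_ediv_right _ _ (by omega : s ≠ 0)]
      have hnum : 0 ≤ b - (a + s) + s - 1 := by omega
      have := Int.ediv_nonneg hnum (by omega : (0:Int) ≤ s)
      omega
    · rw [if_neg h2]
      have hq : (b - a + s - 1) / s = 1 := by
        have : b - a + s - 1 = (b - a - 1) + 1 * s := by ring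
        rw [this, Int.add_mul_ediv_right _ _ (by omega : s ≠ 0)]
        have h0 : (b - a - 1) / s = 0 := Int.ediv_eq_zero_of_lt (by omega) (by omega)
        omega
      rw [hq]
      rfl
  rw [key, List.range_succ_eq_map, List.map_cons, List.map_map]
  refine congrArg₂ List.cons (by push_cast; ring) ?_
  apply List.map_congr_left
  intro k _
  simp only [Function.comp_apply]
  push_cast
  ring

-- shift a positive-step range to start at 0
theorem pyRange_pos_shift (a b s : Int) (hs : 0 < s) :
    PySem.List.pyRange a b s = (PySem.List.pyRange 0 (b - a) s).map (a + ·) := by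
  rw [PySem.List.pyRange_of_pos a b hs, PySem.List.pyRange_of_pos 0 (b - a) hs, List.map_map]
  have : (if a < b then ((b - a + s - 1) / s).toNat else 0)
      = (if 0 < b - a then ((b - a - 0 + s - 1) / s).toNat else 0) := by
    by_cases h : a < b
    · rw [if_pos h, if_pos (by omega)]
      congr 2
      ring
    · rw [if_neg h, if_neg (by omega)]
  rw [this]
  apply List.map_congr_left
  intro k _
  simp only [Function.comp_apply]
  ring

-- members of range(0, b, s) with 0 < s are non-negative
theorem pyRange_pos_mem_nonneg (b s x : Int) (hs : 0 < s)
    (hx : x ∈ PySem.List.pyRange 0 b s) : 0 ≤ x := by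
  rw [PySem.List.pyRange_of_pos 0 b hs] at hx
  rcases List.mem_map.mp hx with ⟨k, _, hk⟩
  subst hk
  positivity

-- B's per-word slicing loop produces exactly the bridge tokens of that word.
theorem slices_eq_tokWordGT (m : Int) (hm : 1 ≤ m) : ∀ (n : Nat) (w : List Char), w.length = n →
    w ≠ [] →
    (PySem.List.pyRange 0 (w.length : Int) m).map
        (fun i => PySem.List.slice w (some i) (some (i + m)))
      = tokWordGT m w := by
  intro n
  induction n using Nat.strong_induction_on with
  | _ n ih =>
    intro w hw hne
    have hpos : (0:Int) < (w.length : Int) := by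
      cases w with
      | nil => exact absurd rfl hne
      | cons a t => simp
    rw [pyRange_pos_cons 0 (w.length : Int) m (by omega) hpos, List.map_cons]
    have hslice0 : PySem.List.slice w (some 0) (some (0 + m))
        = w.take m.toNat := by
      rw [PySem.List.slice_toNat w (le_refl 0) (by omega : (0:Int) ≤ 0 + m)]
      simp only [Int.toNat_zero, List.drop_zero]
      congr 1
      omega
    by_cases h : m < (w.length : Int)
    · rw [tokWordGT_pos m w hm h, hslice0]
      congr 1
      rw [pyRange_pos_shift (0 + m) (w.length : Int) m (by omega)]
      have hlen : ((w.drop m.toNat).length : Int) = (w.length : Int) - (0 + m) := by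
        simp only [List.length_drop]
        omega
      rw [List.map_map, ← hlen]
      have hdrop : (w.drop m.toNat).length < n := by
        simp only [List.length_drop]; omega
      have hdne : w.drop m.toNat ≠ [] := by
        intro hnil
        have := congrArg List.length hnil
        simp only [List.length_drop, List.length_nil] at this
        omega
      rw [← ih _ hdrop _ rfl hdne]
      apply List.map_congr_left
      intro i hi
      have hi0 : 0 ≤ i := pyRange_pos_mem_nonneg _ m i (by omega) hi
      simp only [Function.comp_apply]
      rw [PySem.List.slice_toNat w (by omega) (by omega),
          PySem.List.slice_toNat (w.drop m.toNat) hi0 (by omega),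
          List.drop_drop]
      congr 1
      · omega
      · congr 1
        omega
    · rw [tokWordGT_neg m w (by omega), if_neg (by simp [hne]), hslice0,
          pyRange_pos_nil (0 + m) (w.length : Int) m (by omega) (by omega),
          List.map_nil, List.take_of_length_le (by omega)]

-- folding 'acc ++ [g i]' over a list is map
theorem foldl_append_singleton {α β : Type} (g : α → β) :
    ∀ (l : List α) (acc : List β), l.foldl (fun acc2 i => acc2 ++ [g i]) acc = acc ++ l.map g := by
  intro l
  induction l with
  | nil => intro acc; simp
  | cons x xs ih => intro acc; rw [List.foldl_cons, ih, List.map_cons]; simp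

-- B's tokenisation over the word list is the flatMap of bridge tokens.
theorem tokensB_eq_flatMap (m : Int) (hm : 1 ≤ m) (ws : List (List Char))
    (hws : ∀ w ∈ ws, w ≠ []) :
    tokensB m ws = ws.flatMap (fun w => tokWordGT m w) := by
  unfold tokensB
  suffices h : ∀ acc, ws.foldl (fun acc w =>
      (PySem.List.pyRange 0 (w.length : Int) m).foldl
        (fun acc2 i => acc2 ++ [PySem.List.slice w (some i) (some (i + m))]) acc) acc
      = acc ++ ws.flatMap (fun w => tokWordGT m w) by
    simpa using h []
  induction ws with
  | nil => intro acc; simp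
  | cons w ws ih =>
    intro acc
    rw [List.foldl_cons, foldl_append_singleton _ _ acc,
        slices_eq_tokWordGT m hm w.length w rfl (hws w (by simp)),
        ih (fun w' hw' => hws w' (by simp [hw'])), List.flatMap_cons]
    simp

-- ---- B side: the maximal-group packer equals greedy packing ----

theorem grabB_nil (m : Int) (width : Int) : grabB m width [] = ([], []) := rfl

-- Greedy packing from a non-empty held chunk equals: grab the maximal fitting group,
-- join it onto the chunk, continue with B's packer.
theorem packGT_eq_grab (m : Int) : ∀ (ts : List (List Char)),
    (∀ t ∈ ts, t ≠ [] ∧ (t.length : Int) ≤ m) →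
    ∀ (tw : List (List Char)) (cur : List Char), cur ≠ [] →
    packGT m ts tw cur
      = tw ++ (PySem.Chars.join [' '] (cur :: (grabB m (cur.length : Int) ts).1)
          :: packB m (grabB m (cur.length : Int) ts).2) := by
  intro ts
  induction ts with
  | nil =>
    intro _ tw cur hcur
    have hce : cur.isEmpty = false := by simpa [List.isEmpty_iff] using hcur
    simp [packGT, grabB_nil, packB, PySem.Chars.join_singleton, hce]
  | cons t ts ih =>
    intro hts tw cur hcur
    have hce : cur.isEmpty = false := by simpa [List.isEmpty_iff] using hcur
    obtain ⟨htne, htle⟩ := hts t (by simp)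
    have hts' : ∀ t' ∈ ts, t' ≠ [] ∧ (t'.length : Int) ≤ m := by
      intro t' ht'; exact hts t' (by simp [ht'])
    have hclen : ((cur ++ ' ' :: t).length : Int)
        = (cur.length : Int) + 1 + (t.length : Int) := by
      simp only [List.length_append, List.length_cons]
      push_cast
      omega
    by_cases hfit : (cur.length : Int) + 1 + (t.length : Int) ≤ m
    · -- token joins the group
      simp only [packGT, hce, Bool.false_eq_true, if_false, if_pos (by omega : ((cur ++ ' ' :: t).length : Int) ≤ m)]
      rw [ih hts' tw (cur ++ ' ' :: t) (by simp)]
      simp only [grabB, if_pos hfit]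
      congr 2
      · -- join over the appended chunk
        rw [← hclen]
        cases hg : (grabB m ((cur ++ ' ' :: t).length : Int) ts).1 with
        | nil =>
          rw [PySem.Chars.join_singleton, PySem.Chars.join_cons_cons,
              PySem.Chars.join_singleton]
          simp
        | cons q r =>
          rw [PySem.Chars.join_cons_cons, PySem.Chars.join_cons_cons (sep := [' ']) (p := cur),
              PySem.Chars.join_cons_cons]
          simp
      · rw [← hclen]
    · -- token does not fit: flush, restart the group at t
      rw [packGT_flush m t ts tw cur hce (by omega)]
      rw [ih hts' (tw ++ [cur]) t htne]
      simp only [grabB, if_neg hfit]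
      rw [PySem.Chars.join_singleton]
      conv_rhs => rw [packB]
      simp

-- B's packer on a full token list equals greedy packing from the empty state.
theorem packB_eq_packGT (m : Int) (ts : List (List Char))
    (hts : ∀ t ∈ ts, t ≠ [] ∧ (t.length : Int) ≤ m) :
    packGT m ts [] [] = packB m ts := by
  cases ts with
  | nil => simp [packGT, packB]
  | cons t ts =>
    obtain ⟨htne, htle⟩ := hts t (by simp)
    have hts' : ∀ t' ∈ ts, t' ≠ [] ∧ (t'.length : Int) ≤ m := by
      intro t' ht'; exact hts t' (by simp [ht'])
    simp only [packGT, List.isEmpty_nil, if_true, if_pos htle]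
    rw [packGT_eq_grab m ts hts' [] t htne]
    conv_rhs => rw [packB]
    simp

-- ===== VERDICT (by name: the statement is the Claim_ definition above) =====
theorem generate_thread_spec : Claim_equal_generate_thread := by
  intro content max_chars _hdom hpre
  unfold Spec_generate_thread generate_thread generate_thread_alt
  by_cases hlen : (content.toList.length : Int) ≤ max_chars
  · rw [if_pos hlen, if_pos hlen]
  · rw [if_neg hlen, if_neg hlen]
    rcases hpre with hm | hle | hsp
    · congr 1
      have hprops := split₀_props content.toList
      rw [tokensB_eq_flatMap max_chars hm _ (fun w hw => (hprops w hw).1),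
          ← packB_eq_packGT max_chars _ (by
            intro t ht
            rcases List.mem_flatMap.mp ht with ⟨w', _, ht'⟩
            obtain ⟨h1, h2⟩ := tokWordGT_len max_chars hm w'.length _ rfl t ht'
            exact ⟨h2, h1⟩)]
      exact loopGT_eq_packGT max_chars hm _ hprops [] [] (by simp) (by simp; omega)
    · exact absurd hle hlen
    · rw [split₀_isspace _ (fun c hc => List.all_eq_true.mp hsp c hc)]
      simp [loopGT, tokensB, packB]
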